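-- pv_equiv track=rewrite | github.com/ronyfsw/milestones_chains | modules/chains.py | drop_chain_overlaps
-- ===== SOURCE A (Python) =====
-- def drop_chain_overlaps(chains):
-- 	# Filter a list of chains of short chains that are included in longer chains
-- 	# If chains = [A-B, A-B-C] only A-B-C will be included in the filtered version (keep)
--     chains = list(set([c for c in chains if c]))
--     chains.sort(key=len)
--     exclude, keep = [], []
--     while chains:
--         chain1 = chains[0]
--         chains.remove(chain1)
--         for chain2 in chains:
--             if chain1 in chain2:
--                 exclude.append(chain1)
--                 break
--         if chain1 not in exclude: keep.append(chain1)
--     return keep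
-- ===== SOURCE B (Python) =====
-- def drop_chain_overlaps(chains):
--     # Keep exactly the maximal chains: those with no proper superstring in the pool.
--     pool = sorted(set(c for c in chains if c), key=len)
--     return [c for c in pool if not any(c in d and d != c for d in pool)]
-- ===== Notes on version B (the rewrite author's own statement) =====
-- stated objective: simpler
-- what changed: A runs a destructive while-loop that pops the shortest remaining chain, scans the mutated remainder with a break and an exclude list; B is a single non-destructive filter that keeps a chain iff the pool holds no distinct chain containing it (equal-length distinct chains can never contain each other, so scanning the whole pool is equivalent).
import Mathlib
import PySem

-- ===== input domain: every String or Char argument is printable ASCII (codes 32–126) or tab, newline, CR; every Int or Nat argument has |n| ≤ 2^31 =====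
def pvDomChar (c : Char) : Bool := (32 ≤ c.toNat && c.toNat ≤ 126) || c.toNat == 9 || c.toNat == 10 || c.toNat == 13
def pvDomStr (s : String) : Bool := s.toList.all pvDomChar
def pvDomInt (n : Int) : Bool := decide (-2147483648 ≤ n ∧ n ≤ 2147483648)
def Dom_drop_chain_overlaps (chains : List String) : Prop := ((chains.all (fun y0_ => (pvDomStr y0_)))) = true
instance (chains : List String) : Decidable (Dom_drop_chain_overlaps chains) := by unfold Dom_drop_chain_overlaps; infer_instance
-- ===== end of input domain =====

-- B replaces A's destructive while/remove loop (mutable exclude list, break, rescans of the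
-- shrinking remainder) by one non-destructive comprehension keeping exactly the chains with no
-- distinct containing chain in the pool (objective: simpler). Both programs dedup via a Python
-- set whose iteration order among equal-length chains is hash-dependent; the ports use the
-- deterministic first-occurrence order.

-- ===== PORT A =====
-- while chains: chain1 = chains[0]; chains.remove(chain1); for chain2 in chains: if chain1 in chain2: exclude.append(chain1); break; if chain1 not in exclude: keep.append(chain1)
def pvALoop : List String → List String → List String → List String
  | [], _, keep => keep
  | c :: rest, exclude, keep =>
    let exclude' := if rest.any (fun d => PySem.Str.isIn c d) then exclude ++ [c] else exclude
    let keep' := if exclude'.contains c then keep else keep ++ [c]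
    pvALoop rest exclude' keep'

def drop_chain_overlaps (chains : List String) : List String :=
  let cs := PySem.Set.ofList (chains.filter (fun c => !(c == "")))
  let cs := PySem.List.sorted cs (fun c => PySem.Str.len c)
  pvALoop cs [] []

-- ===== PORT B =====
-- return [c for c in pool if not any(c in d and d != c for d in pool)]
def drop_chain_overlaps_alt (chains : List String) : List String :=
  let pool := PySem.List.sorted (PySem.Set.ofList (chains.filter (fun c => !(c == "")))) (fun c => PySem.Str.len c)
  pool.filter (fun c => !(pool.any (fun d => PySem.Str.isIn c d && d != c)))

-- ===== PRECONDITION & SPEC =====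
def Spec_drop_chain_overlaps (chains : List String) (out : List String) : Prop := out = drop_chain_overlaps_alt chains
instance (chains : List String) (out : List String) : Decidable (Spec_drop_chain_overlaps chains out) := by unfold Spec_drop_chain_overlaps; infer_instance

-- ===== CLAIM (what is proved, stated in full; the proofs are below) =====
def Claim_equal_drop_chain_overlaps : Prop := ∀ (chains : List String), Dom_drop_chain_overlaps chains → Spec_drop_chain_overlaps chains (drop_chain_overlaps chains)

-- ===== LEMMAS AND PROOFS =====

-- 'c is kept': no OTHER element of u has c as a substring
def pvKept (u : List String) (c : String) : Bool :=
  u.all (fun d => !(PySem.Str.isIn c d) || (d == c))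

lemma pvKept_true_iff (u : List String) (c : String) :
    pvKept u c = true ↔ ∀ d ∈ u, PySem.Str.isIn c d = true → d = c := by
  constructor
  · intro h d hdu hds
    have := (List.all_eq_true.mp h) d hdu
    simp only [hds, Bool.not_true, Bool.false_or, beq_iff_eq] at this
    exact this
  · intro h
    rw [pvKept, List.all_eq_true]
    intro d hdu
    cases hds : PySem.Str.isIn c d
    · simp
    · simp [h d hdu hds]

lemma pvKept_false_iff (u : List String) (c : String) :
    pvKept u c = false ↔ ∃ d ∈ u, PySem.Str.isIn c d = true ∧ d ≠ c := by
  rw [Bool.eq_false_iff, Ne, pvKept_true_iff]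
  push Not
  rfl

lemma pvSub_eq {c d : String} (h : PySem.Str.isIn c d = true)
    (hl : d.toList.length ≤ c.toList.length) : c = d := by
  have hs := ((PySem.Str.isIn_iff_infix c d).mp h).sublist
  exact String.toList_inj.mp (hs.eq_of_length (le_antisymm hs.length_le hl))

lemma pvALoop_eq (u : List String) :
    ∀ (L exclude keep : List String),
      L.Nodup →
      L.Pairwise (fun a b => a.toList.length ≤ b.toList.length) →
      (∀ c ∈ L, c ∈ u) →
      (∀ c ∈ L, ∀ d ∈ u, PySem.Str.isIn c d = true → d ≠ c → d ∈ L) →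
      (∀ c ∈ L, c ∉ exclude) →
      pvALoop L exclude keep = keep ++ L.filter (pvKept u)
  | [], exclude, keep, _, _, _, _, _ => by simp [pvALoop]
  | c :: rest, exclude, keep, hnd, hpw, hmem, hclose, hexc => by
    have hndr := List.nodup_cons.mp hnd
    have hpwr := List.pairwise_cons.mp hpw
    have hany : rest.any (fun d => PySem.Str.isIn c d) = !(pvKept u c) := by
      cases hk : pvKept u c
      · -- not kept: some distinct container exists in u, hence (closure) in rest
        obtain ⟨d, hdu, hds, hdne⟩ := (pvKept_false_iff u c).mp hk
        have hdL := hclose c List.mem_cons_self d hdu hds hdne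
        have hdr : d ∈ rest := by
          rcases List.mem_cons.mp hdL with h0 | h0
          · exact absurd h0 hdne
          · exact h0
        simp only [Bool.not_false]
        exact List.any_eq_true.mpr ⟨d, hdr, hds⟩
      · -- kept: no container anywhere in u, so none in rest
        simp only [Bool.not_true]
        rw [List.any_eq_false]
        intro d hdr hds
        have := (pvKept_true_iff u c).mp hk d (hmem d (List.mem_cons_of_mem _ hdr)) hds
        exact hndr.1 (this ▸ hdr)
    have hcloser : ∀ c' ∈ rest, ∀ d ∈ u, PySem.Str.isIn c' d = true → d ≠ c' → d ∈ rest := by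
      intro c' hc' d hdu hds hdne
      have hdL := hclose c' (List.mem_cons_of_mem _ hc') d hdu hds hdne
      rcases List.mem_cons.mp hdL with rfl | h0
      · -- d = c: c' is contained in c, but len c ≤ len c', so c' = c = d, contradiction
        exact absurd (pvSub_eq hds (hpwr.1 c' hc')).symm hdne
      · exact h0
    cases hk : pvKept u c
    · -- excluded branch: exclude' = exclude ++ [c], which contains c
      rw [hk] at hany
      simp only [pvALoop, hany, Bool.not_false, if_true]
      have hcont : (exclude ++ [c]).contains c = true := by
        simp [List.contains_eq_mem]
      rw [hcont]
      simp only [if_true]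
      rw [pvALoop_eq u rest (exclude ++ [c]) keep hndr.2 hpwr.2
        (fun x hx => hmem x (List.mem_cons_of_mem _ hx)) hcloser
        (by
          intro e he
          rw [List.mem_append]
          push Not
          exact ⟨hexc e (List.mem_cons_of_mem _ he), by
            simp only [List.mem_singleton]
            intro h0
            exact hndr.1 (h0 ▸ he)⟩)]
      rw [List.filter_cons]
      simp [hk]
    · -- kept branch: exclude' = exclude, c not in it, so keep' = keep ++ [c]
      rw [hk] at hany
      simp only [pvALoop, hany, Bool.not_true, Bool.false_eq_true, if_false]
      have hcont : exclude.contains c = false := by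
        rw [List.contains_eq_mem]
        simp only [decide_eq_false_iff_not]
        exact hexc c List.mem_cons_self
      rw [hcont]
      simp only [Bool.false_eq_true, if_false]
      rw [pvALoop_eq u rest exclude (keep ++ [c]) hndr.2 hpwr.2
        (fun x hx => hmem x (List.mem_cons_of_mem _ hx)) hcloser
        (fun e he => hexc e (List.mem_cons_of_mem _ he))]
      rw [List.filter_cons]
      simp [hk]

-- B's per-element test over any permutation of u coincides with pvKept u
lemma pvPred_eq (u L : List String) (hperm : L.Perm u) (c : String) :
    (!(L.any (fun d => PySem.Str.isIn c d && d != c))) = pvKept u c := by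
  cases hk : pvKept u c
  · obtain ⟨d, hdu, hds, hdne⟩ := (pvKept_false_iff u c).mp hk
    simp only [Bool.not_eq_false']
    exact List.any_eq_true.mpr ⟨d, hperm.mem_iff.mpr hdu, by
      rw [Bool.and_eq_true, bne_iff_ne]; exact ⟨hds, hdne⟩⟩
  · simp only [Bool.not_eq_true']
    rw [List.any_eq_false]
    intro d hdL
    rw [Bool.and_eq_true, bne_iff_ne]
    rintro ⟨hds, hdne⟩
    exact hdne ((pvKept_true_iff u c).mp hk d (hperm.mem_iff.mp hdL) hds)

-- the two programs agree on any deduplicated chain list sorted by length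
lemma pvMain (u : List String) (hund : u.Nodup) :
    pvALoop (PySem.List.sorted u (fun c => PySem.Str.len c)) [] [] =
      (PySem.List.sorted u (fun c => PySem.Str.len c)).filter
        (fun c => !((PySem.List.sorted u (fun c => PySem.Str.len c)).any
          (fun d => PySem.Str.isIn c d && d != c))) := by
  set La := PySem.List.sorted u (fun c => PySem.Str.len c) with hLa
  have hperm : La.Perm u := PySem.List.sorted_perm u _ _
  have hLand : La.Nodup := hperm.nodup_iff.mpr hund
  have hLapw : La.Pairwise (fun a b => a.toList.length ≤ b.toList.length) := by
    have := PySem.List.sorted_pairwise u (fun c => PySem.Str.len c)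
    refine this.imp ?_
    intro a b h
    rw [PySem.Str.len_eq, PySem.Str.len_eq] at h
    exact_mod_cast h
  have hA : pvALoop La [] [] = La.filter (pvKept u) := by
    rw [pvALoop_eq u La [] [] hLand hLapw
      (fun c hc => (PySem.List.mem_sorted u _ _ c).mp hc)
      (fun c _ d hdu _ _ => (PySem.List.mem_sorted u _ _ d).mpr hdu)
      (fun c _ => List.not_mem_nil)]
    rfl
  have hB : La.filter (fun c => !(La.any (fun d => PySem.Str.isIn c d && d != c)))
      = La.filter (pvKept u) := by
    exact List.filter_congr (fun c _ => pvPred_eq u La hperm c)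
  rw [hA, hB]

-- ===== VERDICT (by name: the statement is the Claim_ definition above) =====
theorem drop_chain_overlaps_spec : Claim_equal_drop_chain_overlaps := by
  intro chains _
  show drop_chain_overlaps chains = drop_chain_overlaps_alt chains
  simp only [drop_chain_overlaps, drop_chain_overlaps_alt]
  exact pvMain _ (PySem.Set.nodup_ofList _)
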